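-- pv_equiv track=rewrite | github.com/hotboat123/hotboat-whatsapp | automations/monitors/appointments_monitor.py | _has_changed
-- ===== SOURCE A (Python) =====
-- from typing import Dict, Any, Set
--
-- def _has_changed(old_appt: Dict, new_appt: Dict) -> bool:
--     """Verifica si una reserva ha cambiado"""
--     fields = [
--         'customer_name', 'customer_phone', 'customer_email',
--         'starts_at', 'duration', 'service_name',
--         'price', 'paid_amount', 'status', 'note'
--     ]
--
--     for field in fields:
--         if old_appt.get(field) != new_appt.get(field):
--             return True
--
--     return False
-- ===== SOURCE B (Python) =====
-- _TRACKED = {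
--     'customer_name', 'customer_phone', 'customer_email',
--     'starts_at', 'duration', 'service_name',
--     'price', 'paid_amount', 'status', 'note'
-- }
--
-- def _has_changed(old_appt, new_appt):
--     """Verifica si una reserva ha cambiado"""
--     def snapshot(appt):
--         snap = {}
--         for key, value in appt.items():
--             if key in _TRACKED:
--                 snap[key] = value
--         return snap
--     return snapshot(old_appt) != snapshot(new_appt)
-- ===== Notes on version B (the rewrite author's own statement) =====
-- stated objective: alternative
-- what changed: Instead of scanning the fixed field list and doing a dict lookup per field with early exit, B makes one pass over each appointment's own items, filtering them through a tracked-field set into snapshot dicts, and compares the two snapshots with a single order-insensitive dict equality.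
import Mathlib
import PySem

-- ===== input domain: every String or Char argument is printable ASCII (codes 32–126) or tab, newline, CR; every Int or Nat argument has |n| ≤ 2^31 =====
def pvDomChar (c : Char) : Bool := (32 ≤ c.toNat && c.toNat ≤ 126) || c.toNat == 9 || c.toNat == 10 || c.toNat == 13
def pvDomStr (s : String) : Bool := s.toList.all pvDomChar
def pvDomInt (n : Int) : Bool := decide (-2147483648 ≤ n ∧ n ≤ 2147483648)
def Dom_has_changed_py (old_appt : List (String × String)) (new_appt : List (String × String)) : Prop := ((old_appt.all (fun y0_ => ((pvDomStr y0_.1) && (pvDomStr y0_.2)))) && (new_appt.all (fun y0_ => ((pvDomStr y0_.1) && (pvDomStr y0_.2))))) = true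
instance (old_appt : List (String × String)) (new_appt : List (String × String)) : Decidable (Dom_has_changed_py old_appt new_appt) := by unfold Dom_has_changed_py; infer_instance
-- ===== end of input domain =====

-- B replaces A's per-field lookup scan (early exit over a fixed field list) by a single pass
-- over each dict's own items filtered into tracked-field snapshot dicts compared at once.


-- ===== PORT A =====
-- The fixed field list of A (and the tracked-field set of B: same ten strings).
def pvFields : List String :=
  ["customer_name", "customer_phone", "customer_email",
   "starts_at", "duration", "service_name",
   "price", "paid_amount", "status", "note"]

-- A's loop: for field in fields: if old.get(field) != new.get(field): return True
def hasChangedLoop (old_appt new_appt : List (String × String)) : List String → Bool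
  | [] => false
  | f :: rest =>
      if (PySem.Dict.mk old_appt).get? f ≠ (PySem.Dict.mk new_appt).get? f then true
      else hasChangedLoop old_appt new_appt rest

def has_changed_py (old_appt : List (String × String)) (new_appt : List (String × String)) : Bool :=
  hasChangedLoop old_appt new_appt pvFields

-- ===== PORT B =====
-- B's snapshot loop: for key, value in appt.items(): if key in _TRACKED: snap[key] = value.
-- The assoc list models the Python dict with FIRST-match lookup, so iterating the dict's
-- items() is exactly folding over the raw pair list while skipping keys already taken
-- (a later duplicate pair is not a dict item); the `!snap.contains` guard encodes that.
def pvSnapshot (appt : List (String × String)) : PySem.Dict String String :=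
  appt.foldl
    (fun snap p =>
      if p.1 ∈ pvFields ∧ ¬ (snap.contains p.1 = true) then snap.insert p.1 p.2 else snap)
    PySem.Dict.empty

-- Python's `dict == dict` (order-insensitive): same size, and every item of the first
-- is mapped identically by the second.
def pyDictEq (d1 d2 : PySem.Dict String String) : Bool :=
  (d1.size == d2.size) && d1.items.all (fun p => d2.get? p.1 == some p.2)

def has_changed_py_alt (old_appt : List (String × String)) (new_appt : List (String × String)) : Bool :=
  !(pyDictEq (pvSnapshot old_appt) (pvSnapshot new_appt))

-- ===== PRECONDITION & SPEC =====
def Spec_has_changed_py (old_appt : List (String × String)) (new_appt : List (String × String)) (out : Bool) : Prop := out = has_changed_py_alt old_appt new_appt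
instance (old_appt : List (String × String)) (new_appt : List (String × String)) (out : Bool) : Decidable (Spec_has_changed_py old_appt new_appt out) := by unfold Spec_has_changed_py; infer_instance

-- ===== CLAIM (what is proved, stated in full; the proofs are below) =====
def Claim_equal_has_changed_py : Prop := ∀ (old_appt : List (String × String)) (new_appt : List (String × String)), Dom_has_changed_py old_appt new_appt → Spec_has_changed_py old_appt new_appt (has_changed_py old_appt new_appt)

-- ===== LEMMAS AND PROOFS =====

-- A's loop is the decision of "some tracked field differs".
lemma hasChangedLoop_eq (o n : List (String × String)) (fs : List String) :
    hasChangedLoop o n fs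
      = !decide (∀ f ∈ fs, (PySem.Dict.mk o).get? f = (PySem.Dict.mk n).get? f) := by
  induction fs with
  | nil => simp [hasChangedLoop]
  | cons f rest ih =>
      by_cases h : (PySem.Dict.mk o).get? f = (PySem.Dict.mk n).get? f <;>
        simp [hasChangedLoop, h, ih]

-- The snapshot fold, with any accumulator: lookups already in the accumulator are kept,
-- fresh tracked keys get the dict's (first-match) value, untracked keys stay untouched.
lemma snapLoop_get? (l : List (String × String)) (snap : PySem.Dict String String) (f : String) :
    (l.foldl
      (fun snap p =>
        if p.1 ∈ pvFields ∧ ¬ (snap.contains p.1 = true) then snap.insert p.1 p.2 else snap)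
      snap).get? f
      = if f ∈ pvFields then
          (if snap.contains f then snap.get? f else (PySem.Dict.mk l).get? f)
        else snap.get? f := by
  induction l generalizing snap with
  | nil =>
      by_cases hf : f ∈ pvFields
      · by_cases hc : snap.contains f = true
        · simp [List.foldl, hf, hc]
        · have h1 : snap.get? f = none :=
            (PySem.Dict.get?_eq_none_iff_contains snap f).mpr (by simpa using hc)
          have h2 : (PySem.Dict.mk ([] : List (String × String))).get? f = none := rfl
          simp [List.foldl, hf, hc, h1, h2]
      · simp [List.foldl, hf]
  | cons p l ih =>
      obtain ⟨k, v⟩ := p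
      simp only [List.foldl]
      by_cases hstep : k ∈ pvFields ∧ ¬ (snap.contains k = true)
      · rw [if_pos hstep, ih]
        by_cases hf : f ∈ pvFields
        · by_cases hfp : f = k
          · subst hfp
            simp [hf, PySem.Dict.contains_insert_self, PySem.Dict.get?_insert_self,
              PySem.Dict.get?_mk_cons, hstep.2]
          · have hcontains : (snap.insert k v).contains f = snap.contains f := by
              simp [PySem.Dict.contains_insert, hfp]
            rw [hcontains]
            by_cases hc : snap.contains f = true
            · simp [hf, hc, PySem.Dict.get?_insert_of_ne _ v hfp]
            · simp [hf, hc, PySem.Dict.get?_mk_cons, Ne.symm hfp]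
        · have hfk : f ≠ k := fun h => hf (h ▸ hstep.1)
          simp [hf, PySem.Dict.get?_insert_of_ne _ v hfk]
      · rw [if_neg hstep, ih]
        by_cases hf : f ∈ pvFields
        · by_cases hc : snap.contains f = true
          · simp [hf, hc]
          · have hfk : f ≠ k := fun h => hstep ⟨h ▸ hf, by simpa [← h] using hc⟩
            simp [hf, hc, PySem.Dict.get?_mk_cons, Ne.symm hfk]
        · simp [hf]

-- Snapshot lookup characterisation.
lemma pvSnapshot_get? (appt : List (String × String)) (f : String) :
    (pvSnapshot appt).get? f
      = if f ∈ pvFields then (PySem.Dict.mk appt).get? f else none := by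
  have := snapLoop_get? appt PySem.Dict.empty f
  simpa [pvSnapshot, PySem.Dict.contains_empty, PySem.Dict.get?_empty] using this

-- Snapshot keys are unique.
lemma pvSnapshot_nodup_keys (appt : List (String × String)) :
    (pvSnapshot appt).keys.Nodup := by
  unfold pvSnapshot
  generalize h0 : PySem.Dict.empty = snap
  have hsnap : snap.keys.Nodup := by rw [← h0]; exact PySem.Dict.nodup_keys_empty
  clear h0
  induction appt generalizing snap with
  | nil => simpa [List.foldl] using hsnap
  | cons p l ih =>
      simp only [List.foldl]
      split_ifs with h
      · exact ih _ (PySem.Dict.nodup_keys_insert _ _ _ hsnap)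
      · exact ih _ hsnap

-- Key membership of a snapshot.
lemma mem_keys_pvSnapshot (appt : List (String × String)) (f : String) :
    f ∈ (pvSnapshot appt).keys ↔ f ∈ pvFields ∧ (PySem.Dict.mk appt).get? f ≠ none := by
  rw [← not_iff_not]
  push Not
  constructor
  · intro h
    have hnone := (PySem.Dict.get?_eq_none_iff_not_mem_keys (pvSnapshot appt) f).mpr h
    rw [pvSnapshot_get?] at hnone
    intro hf
    simpa [hf] using hnone
  · intro h
    apply (PySem.Dict.get?_eq_none_iff_not_mem_keys (pvSnapshot appt) f).mp
    rw [pvSnapshot_get?]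
    by_cases hf : f ∈ pvFields
    · simpa [hf] using h hf
    · simp [hf]

-- Python's dict equality of the two snapshots decides "all tracked fields agree".
lemma pyDictEq_snapshots (o n : List (String × String)) :
    pyDictEq (pvSnapshot o) (pvSnapshot n)
      = decide (∀ f ∈ pvFields, (PySem.Dict.mk o).get? f = (PySem.Dict.mk n).get? f) := by
  have hno := pvSnapshot_nodup_keys o
  have hnn := pvSnapshot_nodup_keys n
  by_cases hP : ∀ f ∈ pvFields, (PySem.Dict.mk o).get? f = (PySem.Dict.mk n).get? f
  · have hkeys : ∀ f, f ∈ (pvSnapshot o).keys ↔ f ∈ (pvSnapshot n).keys := by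
      intro f
      rw [mem_keys_pvSnapshot, mem_keys_pvSnapshot]
      constructor
      · rintro ⟨hf, hne⟩; exact ⟨hf, by rw [← hP f hf]; exact hne⟩
      · rintro ⟨hf, hne⟩; exact ⟨hf, by rw [hP f hf]; exact hne⟩
    have hperm : (pvSnapshot o).keys.Perm (pvSnapshot n).keys :=
      (List.perm_ext_iff_of_nodup hno hnn).mpr hkeys
    have hsize : (pvSnapshot o).size = (pvSnapshot n).size := by
      have := hperm.length_eq
      simpa [PySem.Dict.keys, PySem.Dict.size] using this
    have hall : ∀ p ∈ (pvSnapshot o).items, ((pvSnapshot n).get? p.1 == some p.2) = true := by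
      intro p hp
      have hp' : (p.1, p.2) ∈ (pvSnapshot o).items := by simpa using hp
      have h1 : (pvSnapshot o).get? p.1 = some p.2 :=
        PySem.Dict.get?_of_mem_items _ hp' hno
      rw [pvSnapshot_get?] at h1
      by_cases hf : p.1 ∈ pvFields
      · rw [if_pos hf] at h1
        rw [beq_iff_eq, pvSnapshot_get?, if_pos hf, ← hP p.1 hf]
        exact h1
      · rw [if_neg hf] at h1
        exact absurd h1 (by simp)
    rw [decide_eq_true hP]
    unfold pyDictEq
    rw [Bool.and_eq_true]
    exact ⟨by simpa using hsize, List.all_eq_true.mpr hall⟩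
  · rw [decide_eq_false hP]
    by_contra hbad
    have htrue : pyDictEq (pvSnapshot o) (pvSnapshot n) = true := by
      revert hbad; cases pyDictEq (pvSnapshot o) (pvSnapshot n) <;> simp
    unfold pyDictEq at htrue
    rw [Bool.and_eq_true] at htrue
    obtain ⟨hsizeb, hallb⟩ := htrue
    have hsize : (pvSnapshot o).size = (pvSnapshot n).size := by simpa using hsizeb
    have hall := List.all_eq_true.mp hallb
    have hsub : (pvSnapshot o).keys ⊆ (pvSnapshot n).keys := by
      intro a ha
      have hne : (pvSnapshot o).get? a ≠ none :=
        fun h => ((PySem.Dict.get?_eq_none_iff_not_mem_keys _ _).mp h) ha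
      obtain ⟨w, hw⟩ := Option.ne_none_iff_exists'.mp hne
      have hm := PySem.Dict.mem_items_of_get?_eq_some _ hw
      have h2 := hall (a, w) hm
      simp only [beq_iff_eq] at h2
      by_contra han
      have := (PySem.Dict.get?_eq_none_iff_not_mem_keys _ _).mpr han
      rw [this] at h2
      exact absurd h2 (by simp)
    have hlen : (pvSnapshot n).keys.length ≤ (pvSnapshot o).keys.length := by
      have : (pvSnapshot o).keys.length = (pvSnapshot n).keys.length := by
        simpa [PySem.Dict.keys, PySem.Dict.size] using hsize
      omega
    have hperm : (pvSnapshot o).keys.Perm (pvSnapshot n).keys :=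
      (List.subperm_of_subset hno hsub).perm_of_length_le hlen
    push Not at hP
    obtain ⟨f, hf, hne⟩ := hP
    apply hne
    cases ho : (PySem.Dict.mk o).get? f with
    | none =>
        have hnotn : f ∉ (pvSnapshot n).keys := by
          rw [← hperm.mem_iff, mem_keys_pvSnapshot]
          simp [ho]
        have hzn := (PySem.Dict.get?_eq_none_iff_not_mem_keys _ _).mpr hnotn
        rw [pvSnapshot_get?, if_pos hf] at hzn
        rw [hzn]
    | some v =>
        have hso : (pvSnapshot o).get? f = some v := by
          rw [pvSnapshot_get?, if_pos hf]; exact ho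
        have hm := PySem.Dict.mem_items_of_get?_eq_some _ hso
        have h2 := hall (f, v) hm
        simp only [beq_iff_eq] at h2
        rw [pvSnapshot_get?, if_pos hf] at h2
        exact h2.symm

-- ===== VERDICT =====
theorem has_changed_py_spec : Claim_equal_has_changed_py := by
  intro o n _
  unfold Spec_has_changed_py has_changed_py has_changed_py_alt
  rw [hasChangedLoop_eq, pyDictEq_snapshots]
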